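-- pv_equiv track=rewrite | github.com/samucj73/Test-rouket | IAFODA.py | gerar_entrada_com_vizinhos
-- ===== SOURCE A (Python) =====
-- ordem_roleta = [
--     0, 32, 15, 19, 4, 21, 2, 25, 17, 34, 6, 27,
--     13, 36, 11, 30, 8, 23, 10, 5, 24, 16, 33,
--     1, 20, 14, 31, 9, 22, 18, 29, 7, 28, 12,
--     35, 3, 26
-- ]
--
-- def gerar_entrada_com_vizinhos(terminais):
--     numeros_base = []
--     for t in terminais:
--         numeros_base.extend([n for n in range(37) if n % 10 == t])
--     entrada_completa = set()
--     for numero in numeros_base: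
--         try:
--             idx = ordem_roleta.index(numero)
--             vizinhos = [ordem_roleta[(idx + i) % len(ordem_roleta)] for i in range(-2, 3)]
--             entrada_completa.update(vizinhos)
--         except ValueError:
--             pass
--     return sorted(entrada_completa)
-- ===== SOURCE B (Python) =====
-- ordem_roleta = [
--     0, 32, 15, 19, 4, 21, 2, 25, 17, 34, 6, 27,
--     13, 36, 11, 30, 8, 23, 10, 5, 24, 16, 33,
--     1, 20, 14, 31, 9, 22, 18, 29, 7, 28, 12,
--     35, 3, 26
-- ]
--
-- def gerar_entrada_com_vizinhos(terminais):
--     # one pass over the wheel: a number's terminal is its last digit,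
--     # and every wheel position already knows its five neighbours
--     terms = set(terminais)
--     n = len(ordem_roleta)
--     result = set()
--     for idx, num in enumerate(ordem_roleta):
--         if num % 10 in terms:
--             for i in range(-2, 3):
--                 result.add(ordem_roleta[(idx + i) % n])
--     return sorted(result)
-- ===== Notes on version B (the rewrite author's own statement) =====
-- stated objective: faster
-- what changed: Instead of materialising, per terminal, the list of base numbers from range(37) and running a repeated ordem_roleta.index scan for each, B makes one enumerate pass over the wheel, tests each number's last digit against a set of the terminals, and adds the five wheel neighbours directly; sorted set returned as before.
import Mathlib
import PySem

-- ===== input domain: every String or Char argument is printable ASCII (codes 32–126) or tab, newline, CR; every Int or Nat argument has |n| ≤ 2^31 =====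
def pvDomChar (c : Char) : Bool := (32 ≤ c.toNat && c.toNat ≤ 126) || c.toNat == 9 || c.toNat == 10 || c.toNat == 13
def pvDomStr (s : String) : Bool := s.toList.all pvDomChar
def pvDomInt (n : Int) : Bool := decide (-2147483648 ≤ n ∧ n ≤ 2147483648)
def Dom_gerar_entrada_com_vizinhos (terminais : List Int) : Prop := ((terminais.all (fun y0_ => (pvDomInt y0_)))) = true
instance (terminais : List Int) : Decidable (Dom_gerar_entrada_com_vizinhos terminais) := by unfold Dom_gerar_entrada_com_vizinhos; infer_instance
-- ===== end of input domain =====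

-- B replaces A's per-terminal range(37) scans and repeated .index calls by a single
-- enumerate pass over the wheel with a last-digit membership test (objective: simpler).

-- ===== PORT A =====
def ordem_roleta : List Int := [
  0, 32, 15, 19, 4, 21, 2, 25, 17, 34, 6, 27,
  13, 36, 11, 30, 8, 23, 10, 5, 24, 16, 33,
  1, 20, 14, 31, 9, 22, 18, 29, 7, 28, 12,
  35, 3, 26]

-- the line 'vizinhos = [ordem_roleta[(idx + i) % len(ordem_roleta)] for i in range(-2, 3)]';
-- the index (idx+i) % 37 lies in [0,37), so pyGetD's default 0 is never used
def pvVizinhos (idx : Int) : List Int :=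
  (PySem.List.pyRange (-2) 3 1).map (fun i =>
    PySem.List.pyGetD ordem_roleta (PySem.Int.mod (idx + i) ((ordem_roleta.length : Int))) 0)

def gerar_entrada_com_vizinhos (terminais : List Int) : List Int :=
  let numeros_base : List Int :=
    terminais.foldl (fun acc t =>
      acc ++ ((PySem.List.pyRange 0 37 1).filter (fun n => PySem.Int.mod n 10 == t))) []
  let entrada_completa : PySem.Set Int :=
    numeros_base.foldl (fun s numero =>
      match PySem.List.index? ordem_roleta numero with
      | some idx => PySem.Set.update s (pvVizinhos (idx : Int))
      | none => s) PySem.Set.empty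
  PySem.List.sorted entrada_completa (fun x => x) false

-- ===== PORT B =====
def gerar_entrada_com_vizinhos_alt (terminais : List Int) : List Int :=
  let terms : PySem.Set Int := PySem.Set.ofList terminais
  let n : Int := (ordem_roleta.length : Int)
  let result : PySem.Set Int :=
    (PySem.List.enumerate ordem_roleta 0).foldl (fun s p =>
      if PySem.Set.contains terms (PySem.Int.mod p.2 10) then
        (PySem.List.pyRange (-2) 3 1).foldl (fun s i =>
          PySem.Set.add s (PySem.List.pyGetD ordem_roleta (PySem.Int.mod (p.1 + i) n) 0)) s
      else s) PySem.Set.empty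
  PySem.List.sorted result (fun x => x) false

-- ===== PRECONDITION & SPEC =====
def Spec_gerar_entrada_com_vizinhos (terminais : List Int) (out : List Int) : Prop := out = gerar_entrada_com_vizinhos_alt terminais
instance (terminais : List Int) (out : List Int) : Decidable (Spec_gerar_entrada_com_vizinhos terminais out) := by unfold Spec_gerar_entrada_com_vizinhos; infer_instance

-- ===== CLAIM (what is proved, stated in full; the proofs are below) =====
def Claim_equal_gerar_entrada_com_vizinhos : Prop := ∀ (terminais : List Int), Dom_gerar_entrada_com_vizinhos terminais → Spec_gerar_entrada_com_vizinhos terminais (gerar_entrada_com_vizinhos terminais)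

-- ===== LEMMAS AND PROOFS =====

-- membership through A's set-building loop
theorem memA_fold (l : List Int) (s : PySem.Set Int) (x : Int) :
    x ∈ l.foldl (fun s numero =>
      match PySem.List.index? ordem_roleta numero with
      | some idx => PySem.Set.update s (pvVizinhos (idx : Int))
      | none => s) s ↔
    x ∈ s ∨ ∃ m ∈ l, ∃ idx, PySem.List.index? ordem_roleta m = some idx ∧ x ∈ pvVizinhos (idx : Int) := by
  induction l generalizing s with
  | nil => simp
  | cons m l ih =>
    simp only [List.foldl_cons, ih, List.mem_cons]
    cases h : PySem.List.index? ordem_roleta m with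
    | none =>
      constructor
      · rintro (hs | ⟨e, he, hrest⟩)
        · exact Or.inl hs
        · exact Or.inr ⟨e, Or.inr he, hrest⟩
      · rintro (hs | ⟨e, (rfl | he), hrest⟩)
        · exact Or.inl hs
        · rcases hrest with ⟨idx, hidx, _⟩; rw [h] at hidx; cases hidx
        · exact Or.inr ⟨e, he, hrest⟩
    | some idx =>
      rw [PySem.Set.mem_update]
      constructor
      · rintro (⟨hs | hv⟩ | ⟨e, he, hrest⟩)
        · exact Or.inl hs
        · exact Or.inr ⟨m, Or.inl rfl, idx, h, hv⟩
        · exact Or.inr ⟨e, Or.inr he, hrest⟩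
      · rintro (hs | ⟨e, (rfl | he), hrest⟩)
        · exact Or.inl (Or.inl hs)
        · rcases hrest with ⟨idx', hidx', hv⟩; rw [h] at hidx'; cases hidx'
          exact Or.inl (Or.inr hv)
        · exact Or.inr ⟨e, he, hrest⟩

-- membership through B's set-building loop
theorem memB_fold (terms : PySem.Set Int) (l : List (Int × Int)) (s : PySem.Set Int) (x : Int) :
    x ∈ l.foldl (fun s p =>
      if PySem.Set.contains terms (PySem.Int.mod p.2 10) then
        (PySem.List.pyRange (-2) 3 1).foldl (fun s i =>
          PySem.Set.add s (PySem.List.pyGetD ordem_roleta (PySem.Int.mod (p.1 + i) ((ordem_roleta.length : Int))) 0)) s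
      else s) s ↔
    x ∈ s ∨ ∃ p ∈ l, PySem.Int.mod p.2 10 ∈ terms ∧ x ∈ pvVizinhos p.1 := by
  induction l generalizing s with
  | nil => simp
  | cons p l ih =>
    simp only [List.foldl_cons, ih, List.mem_cons]
    by_cases hc : PySem.Int.mod p.2 10 ∈ terms
    · rw [if_pos ((PySem.Set.contains_iff _ _).mpr hc), PySem.Set.mem_foldl_add]
      constructor
      · rintro (⟨hs | ⟨i, hi, rfl⟩⟩ | ⟨q, hq, hrest⟩)
        · exact Or.inl hs
        · exact Or.inr ⟨p, Or.inl rfl, hc, by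
            simp only [pvVizinhos, List.mem_map]; exact ⟨i, hi, rfl⟩⟩
        · exact Or.inr ⟨q, Or.inr hq, hrest⟩
      · rintro (hs | ⟨q, (rfl | hq), hm, hv⟩)
        · exact Or.inl (Or.inl hs)
        · simp only [pvVizinhos, List.mem_map] at hv
          rcases hv with ⟨i, hi, rfl⟩
          exact Or.inl (Or.inr ⟨i, hi, rfl⟩)
        · exact Or.inr ⟨q, hq, hm, hv⟩
    · rw [if_neg (by simp only [Bool.not_eq_true]; exact (Bool.not_eq_true _).mp (fun h => hc ((PySem.Set.contains_iff _ _).mp h)))]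
      constructor
      · rintro (hs | ⟨q, hq, hrest⟩)
        · exact Or.inl hs
        · exact Or.inr ⟨q, Or.inr hq, hrest⟩
      · rintro (hs | ⟨q, (rfl | hq), hm, hv⟩)
        · exact Or.inl hs
        · exact absurd hm hc
        · exact Or.inr ⟨q, hq, hm, hv⟩

-- nodup through the loops
theorem nodupA_fold (l : List Int) (s : PySem.Set Int) (hs : s.Nodup) :
    (l.foldl (fun s numero =>
      match PySem.List.index? ordem_roleta numero with
      | some idx => PySem.Set.update s (pvVizinhos (idx : Int))
      | none => s) s).Nodup := by
  induction l generalizing s with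
  | nil => exact hs
  | cons m l ih =>
    simp only [List.foldl_cons]
    cases PySem.List.index? ordem_roleta m with
    | none => exact ih _ hs
    | some idx => exact ih _ (PySem.Set.nodup_update _ _ hs)

theorem nodupB_fold (terms : PySem.Set Int) (l : List (Int × Int)) (s : PySem.Set Int) (hs : s.Nodup) :
    (l.foldl (fun s p =>
      if PySem.Set.contains terms (PySem.Int.mod p.2 10) then
        (PySem.List.pyRange (-2) 3 1).foldl (fun s i =>
          PySem.Set.add s (PySem.List.pyGetD ordem_roleta (PySem.Int.mod (p.1 + i) ((ordem_roleta.length : Int))) 0)) s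
      else s) s).Nodup := by
  induction l generalizing s with
  | nil => exact hs
  | cons p l ih =>
    simp only [List.foldl_cons]
    split
    · refine ih _ ?_
      generalize PySem.List.pyRange (-2) 3 1 = r
      induction r generalizing s with
      | nil => exact hs
      | cons i r ihr => exact ihr _ (PySem.Set.nodup_add _ _ hs)
    · exact ih _ hs

-- finite wheel facts, by computation
theorem wheel_range (k : Nat) (hk : k < ordem_roleta.length) : 0 ≤ ordem_roleta[k] ∧ ordem_roleta[k] < 37 := by
  have hall : ordem_roleta.all (fun m => decide (0 ≤ m ∧ m < 37)) = true := by decide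
  rw [List.all_eq_true] at hall
  simpa using hall _ (List.getElem_mem hk)

theorem wheel_idx_self (k : Nat) (hk : k < ordem_roleta.length) :
    PySem.List.index? ordem_roleta (ordem_roleta[k]) = some k := by
  have hall : ((List.range 37).all
      (fun k => PySem.List.index? ordem_roleta (ordem_roleta[k]?.getD 0) == some k)) = true := by decide
  rw [List.all_eq_true] at hall
  have h37 : k < 37 := by simpa [show ordem_roleta.length = 37 from by decide] using hk
  have h := hall k (List.mem_range.mpr h37)
  rw [List.getElem?_eq_getElem hk] at h
  simpa using h

theorem wheel_idx_sound (m : Int) (idx : Nat) (h : PySem.List.index? ordem_roleta m = some idx) :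
    idx < 37 ∧ ordem_roleta[idx]! = m := by
  obtain ⟨hk, hval, -⟩ := PySem.List.getElem_of_index?_eq_some h
  have hlen : ordem_roleta.length = 37 := by decide
  refine ⟨hlen ▸ hk, ?_⟩
  rw [getElem!_pos ordem_roleta idx hk]; exact hval

-- the two sets have the same members
theorem mem_iff (terminais : List Int) (x : Int) :
    (∃ m ∈ terminais.foldl (fun acc t =>
        acc ++ ((PySem.List.pyRange 0 37 1).filter (fun n => PySem.Int.mod n 10 == t))) [],
      ∃ idx, PySem.List.index? ordem_roleta m = some idx ∧ x ∈ pvVizinhos (idx : Int)) ↔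
    (∃ p ∈ PySem.List.enumerate ordem_roleta 0,
      PySem.Int.mod p.2 10 ∈ PySem.Set.ofList terminais ∧ x ∈ pvVizinhos p.1) := by
  rw [PySem.List.foldl_append_eq_flatMap]
  simp only [List.nil_append, List.mem_flatMap, List.mem_filter, PySem.List.mem_pyRange_one,
    PySem.List.mem_enumerate_iff, PySem.Set.mem_ofList, beq_iff_eq]
  constructor
  · rintro ⟨m, ⟨t, ht, ⟨h0, h1⟩, hmod⟩, idx, hidx, hv⟩
    obtain ⟨hk, hval⟩ := wheel_idx_sound m idx hidx
    have hlen : ordem_roleta.length = 37 := by decide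
    have hkl : idx < ordem_roleta.length := hlen ▸ hk
    have hval' : ordem_roleta[idx] = m := by rw [← getElem!_pos ordem_roleta idx hkl]; exact hval
    refine ⟨((idx : Int), m), ⟨idx, hkl, by simp [hval']⟩, ?_, hv⟩
    simp only [hmod]; exact ht
  · rintro ⟨p, ⟨k, hk, rfl⟩, hm, hv⟩
    refine ⟨ordem_roleta[k], ⟨PySem.Int.mod (ordem_roleta[k]) 10, hm, wheel_range k hk, rfl⟩,
      k, wheel_idx_self k hk, ?_⟩
    simpa using hv

-- ===== VERDICT (by name: the statement is the Claim_ definition above) =====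
theorem gerar_entrada_com_vizinhos_spec : Claim_equal_gerar_entrada_com_vizinhos := by
  intro terminais _
  unfold Spec_gerar_entrada_com_vizinhos gerar_entrada_com_vizinhos gerar_entrada_com_vizinhos_alt
  refine PySem.List.sorted_eq_sorted_of_perm _ _ _ (fun a b h => h) ?_
  rw [List.perm_ext_iff_of_nodup (nodupA_fold _ PySem.Set.empty (by decide)) (nodupB_fold _ _ PySem.Set.empty (by decide))]
  intro x
  rw [memA_fold, memB_fold]
  simp only [PySem.Set.empty, List.not_mem_nil, false_or]
  exact mem_iff terminais x
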